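-- pv_equiv track=rewrite | github.com/FawenYo/NTU_Programming-for-Business-Computing | Exam/midterm_two/problem2.py | replace_quotes
-- ===== SOURCE A (Python) =====
-- def replace_quotes(title, temp=""):
--     in_quotes = False
--     for chr_index in range(len(title)):
--         character = title[chr_index]
--
--         if character != '"':
--             temp += character
--         else:
--             # 引號不成對
--             if '"' not in title[chr_index + 1 :] and not in_quotes:
--                 temp += character
--             else:
--                 if not in_quotes:
--                     in_quotes = True
--                     temp += "「"
--                 else:
--                     in_quotes = False
--                     temp += "」"
--     return temp
-- ===== SOURCE B (Python) =====
-- def replace_quotes(title, temp=""):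
--     n = title.count('"')
--     seen = 0
--     out = []
--     for c in title:
--         if c == '"':
--             if seen % 2 == 0 and seen == n - 1:
--                 out.append(c)  # last quote has no partner: keep it literal
--             else:
--                 out.append("「" if seen % 2 == 0 else "」")
--             seen += 1
--         else:
--             out.append(c)
--     return temp + "".join(out)
-- ===== Notes on version B (the rewrite author's own statement) =====
-- stated objective: faster
-- what changed: B counts the quotes once up front and walks the string a single time with a seen-quote counter (parity decides open/close, seen==n-1 with even parity detects the unpaired last quote), instead of A's rescan of the whole remaining suffix at every quote.
import Mathlib
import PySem

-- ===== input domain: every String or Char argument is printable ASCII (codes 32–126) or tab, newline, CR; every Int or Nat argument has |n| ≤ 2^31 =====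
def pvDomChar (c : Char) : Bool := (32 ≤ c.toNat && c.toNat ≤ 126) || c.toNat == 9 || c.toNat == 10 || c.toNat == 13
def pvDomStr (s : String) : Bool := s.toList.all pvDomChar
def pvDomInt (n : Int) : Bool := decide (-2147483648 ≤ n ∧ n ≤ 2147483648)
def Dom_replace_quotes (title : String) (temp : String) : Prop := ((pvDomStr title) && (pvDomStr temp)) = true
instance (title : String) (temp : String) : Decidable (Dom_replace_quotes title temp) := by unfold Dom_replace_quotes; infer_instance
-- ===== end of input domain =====

-- B replaces A's per-quote rescan of the remaining suffix by one precomputed quote count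
-- plus a single pass with a seen-quote counter (objective: faster, O(n) vs O(n^2)).

-- ===== PORT A =====
-- step of A's for-loop over range(len(title)); state = (in_quotes, temp so far)
def pvStepA (cs : List Char) (st : Bool × List Char) (chr_index : Int) : Bool × List Char :=
  let character := PySem.List.pyGetD cs chr_index ' '   -- index from range(len(title)): always in range
  if character ≠ '"' then (st.1, st.2 ++ [character])
  else if ¬ ('"' ∈ PySem.List.slice cs (some (chr_index + 1)) none) ∧ st.1 = false then
    (st.1, st.2 ++ [character])
  else if st.1 = false then (true, st.2 ++ ['「'])
  else (false, st.2 ++ ['」'])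

def replace_quotes (title : String) (temp : String) : String :=
  let cs := title.toList
  let res := (PySem.List.pyRange 0 (cs.length : Int) 1).foldl (pvStepA cs) (false, temp.toList)
  String.ofList res.2

-- ===== PORT B =====
-- step of B's single pass; state = (seen quote count, output chars)
def pvStepB (n : Nat) (st : Nat × List Char) (c : Char) : Nat × List Char :=
  if c = '"' then
    if st.1 % 2 = 0 ∧ st.1 = n - 1 then (st.1 + 1, st.2 ++ [c])
    else (st.1 + 1, st.2 ++ [if st.1 % 2 = 0 then '「' else '」'])
  else (st.1, st.2 ++ [c])

def replace_quotes_alt (title : String) (temp : String) : String :=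
  let cs := title.toList
  let n := cs.count '"'
  let res := cs.foldl (pvStepB n) (0, ([] : List Char))
  String.ofList (temp.toList ++ res.2)

-- ===== PRECONDITION & SPEC =====
def Spec_replace_quotes (title : String) (temp : String) (out : String) : Prop := out = replace_quotes_alt title temp
instance (title : String) (temp : String) (out : String) : Decidable (Spec_replace_quotes title temp out) := by unfold Spec_replace_quotes; infer_instance

-- ===== CLAIM (what is proved, stated in full; the proofs are below) =====
def Claim_equal_replace_quotes : Prop := ∀ (title : String) (temp : String), Dom_replace_quotes title temp → Spec_replace_quotes title temp (replace_quotes title temp)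

-- ===== LEMMAS AND PROOFS =====

-- structural form of A's loop: process the remaining suffix directly
def pvAuxA : List Char → Bool × List Char → Bool × List Char
  | [], st => st
  | c :: rest, st =>
      pvAuxA rest
        (if c ≠ '"' then (st.1, st.2 ++ [c])
         else if ¬ ('"' ∈ rest) ∧ st.1 = false then (st.1, st.2 ++ [c])
         else if st.1 = false then (true, st.2 ++ ['「'])
         else (false, st.2 ++ ['」']))

lemma pvA_bridge (cs : List Char) (k : Nat) (st : Bool × List Char) :
    (PySem.List.pyRange (k : Int) (cs.length : Int) 1).foldl (pvStepA cs) st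
      = pvAuxA (cs.drop k) st := by
  generalize hm : cs.length - k = m
  induction m generalizing k st with
  | zero =>
      have hk : cs.length ≤ k := by omega
      rw [PySem.List.pyRange_one_eq_nil (by exact_mod_cast hk),
          List.drop_eq_nil_of_le hk]
      rfl
  | succ m ih =>
      have hk : k < cs.length := by omega
      rw [PySem.List.pyRange_one_cons (by exact_mod_cast hk), List.foldl_cons,
          List.drop_eq_getElem_cons hk]
      have hget : PySem.List.pyGetD cs (k : Int) ' ' = cs[k] := by
        rw [PySem.List.pyGetD_natCast, List.getD_eq_getElem cs ' ' hk]
      have hslice : PySem.List.slice cs (some ((k : Int) + 1)) none = cs.drop (k + 1) := by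
        have : ((k : Int) + 1) = ((k + 1 : Nat) : Int) := by push_cast; ring
        rw [this, PySem.List.slice_from_natCast]
      have hstep : pvStepA cs st (k : Int)
          = (if cs[k] ≠ '"' then (st.1, st.2 ++ [cs[k]])
             else if ¬ ('"' ∈ cs.drop (k + 1)) ∧ st.1 = false then (st.1, st.2 ++ [cs[k]])
             else if st.1 = false then (true, st.2 ++ ['「'])
             else (false, st.2 ++ ['」'])) := by
        unfold pvStepA
        rw [hget, hslice]
      rw [hstep]
      have hcast : (k : Int) + 1 = ((k + 1 : Nat) : Int) := by push_cast; ring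
      rw [hcast, ih (k + 1) _ (by omega)]
      rfl

lemma pvB_shift (n : Nat) : ∀ (rest : List Char) (seen : Nat) (out : List Char),
    rest.foldl (pvStepB n) (seen, out)
      = ((rest.foldl (pvStepB n) (seen, ([] : List Char))).1,
         out ++ (rest.foldl (pvStepB n) (seen, ([] : List Char))).2) := by
  intro rest
  induction rest with
  | nil => intro seen out; simp
  | cons c rest ih =>
      intro seen out
      simp only [List.foldl_cons]
      have hs : pvStepB n (seen, out) c
          = ((pvStepB n (seen, ([] : List Char)) c).1,
             out ++ (pvStepB n (seen, ([] : List Char)) c).2) := by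
        unfold pvStepB; split_ifs <;> simp
      rw [hs, ih, ih ((pvStepB n (seen, ([] : List Char)) c).1)
            ((pvStepB n (seen, ([] : List Char)) c).2)]
      simp

lemma pvMain (n : Nat) : ∀ (rest : List Char) (seen : Nat) (inq : Bool) (acc : List Char),
    n = seen + rest.count '"' →
    (rest.count '"' = 0 ∨ inq = decide (seen % 2 = 1)) →
    (pvAuxA rest (inq, acc)).2 = acc ++ (rest.foldl (pvStepB n) (seen, ([] : List Char))).2 := by
  intro rest
  induction rest with
  | nil => intro seen inq acc _ _; simp [pvAuxA]
  | cons c rest ih =>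
      intro seen inq acc hn hinv
      simp only [pvAuxA, List.foldl_cons]
      by_cases hc : c = '"'
      · subst hc
        have hcount : (('"' : Char) :: rest).count '"' = rest.count '"' + 1 := by
          simp
        rw [hcount] at hn
        have hq : inq = decide (seen % 2 = 1) := by
          rcases hinv with h | h
          · rw [hcount] at h; omega
          · exact h
        have hstepB : pvStepB n (seen, ([] : List Char)) '"'
            = (seen + 1,
               if seen % 2 = 0 ∧ seen = n - 1 then ['"']
               else [if seen % 2 = 0 then '「' else '」']) := by
          unfold pvStepB
          rw [if_pos rfl]
          split_ifs <;> simp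
        rw [hstepB, pvB_shift, if_neg (by simp : ¬ (('"' : Char) ≠ '"'))]
        by_cases hm : ('"' : Char) ∈ rest
        · -- more quotes remain: toggle branch on both sides
          have hmc : rest.count '"' ≠ 0 := fun h0 => (List.count_eq_zero.mp h0) hm
          have hnot : ¬ (seen % 2 = 0 ∧ seen = n - 1) := by omega
          rw [if_neg (by simp [hm]), if_neg hnot]
          cases inq with
          | false =>
            have h1 : ¬ seen % 2 = 1 := by simpa using hq.symm
            have he : seen % 2 = 0 := by omega
            rw [if_pos (by rfl), if_pos he,
                ih (seen + 1) true (acc ++ ['「']) (by omega)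
                  (Or.inr (by simp; omega))]
            simp
          | true =>
            have h1 : seen % 2 = 1 := by simpa using hq.symm
            rw [if_neg (by simp), if_neg (by omega : ¬ seen % 2 = 0),
                ih (seen + 1) false (acc ++ ['」']) (by omega)
                  (Or.inr (by simp; omega))]
            simp
        · -- no quote remains after this one
          have hmc : rest.count '"' = 0 := List.count_eq_zero.mpr hm
          cases inq with
          | false =>
            have h1 : ¬ seen % 2 = 1 := by simpa using hq.symm
            have he : seen % 2 = 0 := by omega
            rw [if_pos (⟨hm, rfl⟩ : ¬ ('"' : Char) ∈ rest ∧ ((false, acc).1 = false)),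
                if_pos (⟨he, by omega⟩ : seen % 2 = 0 ∧ seen = n - 1),
                ih (seen + 1) false (acc ++ ['"']) (by omega) (Or.inl hmc)]
            simp
          | true =>
            have h1 : seen % 2 = 1 := by simpa using hq.symm
            have hnot : ¬ (seen % 2 = 0 ∧ seen = n - 1) := by omega
            rw [if_neg (by simp), if_neg (by simp), if_neg hnot,
                if_neg (by omega : ¬ seen % 2 = 0),
                ih (seen + 1) false (acc ++ ['」']) (by omega) (Or.inl hmc)]
            simp
      · have hcount : (c :: rest).count '"' = rest.count '"' := by
          simp [hc]
        rw [hcount] at hn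
        have hstepB : pvStepB n (seen, ([] : List Char)) c = (seen, [c]) := by
          unfold pvStepB; simp [hc]
        rw [hstepB, pvB_shift]
        simp only [if_pos (by simpa using hc : c ≠ '"')]
        rw [ih seen inq (acc ++ [c]) hn (by rw [hcount] at hinv; exact hinv)]
        simp

-- ===== VERDICT (by name: the statement is the Claim_ definition above) =====
theorem replace_quotes_spec : Claim_equal_replace_quotes := by
  intro title temp _
  unfold Spec_replace_quotes replace_quotes replace_quotes_alt
  have h0 := pvA_bridge title.toList 0 (false, temp.toList)
  simp only [Nat.cast_zero, List.drop_zero] at h0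
  simp only [h0]
  rw [pvMain (title.toList.count '"') title.toList 0 false temp.toList (by simp) (by simp)]
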